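-- pv_equiv track=rewrite | github.com/ogalush/discover-stocks | utils/common.py | format_vote_data_with_thresh
-- ===== SOURCE A (Python) =====
-- THRESHOLDS=[100, 50, 30, 20, 10, 5]
--
-- def format_vote_data_with_thresh(vote_data):
--     """
--     投票データを閾値に基づいて区切り（###）を入れて銘柄コードをリストにする
--     範囲表示形式（例：100～、50～99）で区切りを表示
--
--     Parameters:
--     vote_data (list): [銘柄コード(row[0]), 投票数(row[1])] の形式のリスト
--
--     Returns:
--     str: 区切り（###）と銘柄コードを改行コードでつないだ文字列
--     """
--     thresholds = sorted(THRESHOLDS, reverse=True) # 念のため区切りを降順にする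
--     sorted_data = sorted(vote_data, key=lambda row: row[1], reverse=True) # 念のためデータを票数の降順にする
--
--     result = []
--     # 各閾値ごとにデータを処理
--     for i, threshold in enumerate(thresholds):
--         # 範囲表示のラベルを作成
--         if i == 0:
--             # 最大閾値の場合は「100～」のような表示
--             range_label = f"###{threshold}～"
--         else:
--             # その他の閾値の場合は「50～99」のような表示
--             upper_limit = thresholds[i-1] - 1
--             range_label = f"###{threshold}～{upper_limit}"
--
--         result.append(range_label)
--
--         # この閾値以上の投票数を持つキーを追加
--         next_threshold = thresholds[i-1] if i > 0 else float('inf')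
--
--         keys_in_range = [row[0] for row in sorted_data
--                          if row[1] >= threshold and row[1] < next_threshold]
--         result.extend(keys_in_range)
--
--     # 最小閾値以下のデータを処理
--     min_threshold = thresholds[-1]
--     result.append(f"###～{min_threshold-1}")
--
--     keys_below_min = [row[0] for row in sorted_data if row[1] < min_threshold]
--     result.extend(keys_below_min)
--
--     return '\n'.join(result)
-- ===== SOURCE B (Python) =====
-- THRESHOLDS=[100, 50, 30, 20, 10, 5]
--
-- _LABELS = ["###100\uff5e", "###50\uff5e99", "###30\uff5e49", "###20\uff5e29",
--            "###10\uff5e19", "###5\uff5e9", "###\uff5e4"]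
--
-- def format_vote_data_with_thresh(vote_data):
--     # single pass over the once-sorted data into seven buckets, then interleave labels
--     buckets = [[] for _ in _LABELS]
--     for row in sorted(vote_data, key=lambda row: row[1], reverse=True):
--         votes = row[1]
--         if votes >= 100: i = 0
--         elif votes >= 50: i = 1
--         elif votes >= 30: i = 2
--         elif votes >= 20: i = 3
--         elif votes >= 10: i = 4
--         elif votes >= 5: i = 5
--         else: i = 6
--         buckets[i].append(row[0])
--     lines = []
--     for label, bucket in zip(_LABELS, buckets):
--         lines.append(label)
--         lines.extend(bucket)
--     return '\n'.join(lines)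
-- ===== Notes on version B (the rewrite author's own statement) =====
-- stated objective: simpler
-- what changed: Replaces A's per-threshold re-scan of the sorted list (one filter pass per range plus computed labels) with a single bucketing pass over the sorted data into seven lists, then interleaves fixed labels with their buckets.
import Mathlib
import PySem

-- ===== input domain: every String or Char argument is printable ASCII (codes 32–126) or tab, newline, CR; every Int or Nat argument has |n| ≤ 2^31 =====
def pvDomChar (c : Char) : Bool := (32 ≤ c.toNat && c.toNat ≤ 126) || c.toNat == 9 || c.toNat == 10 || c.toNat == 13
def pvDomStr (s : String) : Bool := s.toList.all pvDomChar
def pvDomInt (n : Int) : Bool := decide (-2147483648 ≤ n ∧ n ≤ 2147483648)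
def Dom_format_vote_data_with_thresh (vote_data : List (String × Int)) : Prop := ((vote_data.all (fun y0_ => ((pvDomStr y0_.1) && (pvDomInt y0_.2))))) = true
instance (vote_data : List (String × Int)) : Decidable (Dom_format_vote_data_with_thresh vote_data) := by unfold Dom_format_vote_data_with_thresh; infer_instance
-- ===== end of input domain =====

-- B replaces A's per-threshold re-scan with a single bucketing pass over the sorted data (simpler decomposition).

-- ===== PORT A =====
def THRESHOLDS : List Int := [100, 50, 30, 20, 10, 5]

def format_vote_data_with_thresh (vote_data : List (String × Int)) : String :=
  let thresholds := PySem.List.sorted THRESHOLDS (fun x => x) true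
  let sorted_data := PySem.List.sorted vote_data (fun row => row.2) true
  let result := (PySem.List.enumerate thresholds).foldl (fun result it =>
    let i := it.1
    let threshold := it.2
    let range_label :=
      if i == 0 then "###" ++ PySem.Int.toStr threshold ++ "～"
      else "###" ++ PySem.Int.toStr threshold ++ "～" ++
             PySem.Int.toStr (PySem.List.pyGetD thresholds (i - 1) 0 - 1)
    let result := result ++ [range_label]
    -- next_threshold is float('inf') when i == 0, and 'row[1] < inf' is always true for int votes,
    -- so the test is ported exactly as 'i == 0 || row[1] < thresholds[i-1]'.
    -- thresholds[i-1] is only evaluated with 1 ≤ i < len(thresholds), so pyGetD is exact here.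
    let keys_in_range := (sorted_data.filter (fun row =>
        row.2 ≥ threshold && (i == 0 || row.2 < PySem.List.pyGetD thresholds (i - 1) 0))).map (·.1)
    result ++ keys_in_range) []
  let min_threshold := PySem.List.pyGetD thresholds (-1) 0   -- thresholds is nonempty, exact
  let result := result ++ ["###～" ++ PySem.Int.toStr (min_threshold - 1)]
  let result := result ++ (sorted_data.filter (fun row => row.2 < min_threshold)).map (·.1)
  PySem.Str.join "\n" result

-- ===== PORT B =====
def pvLabels : List String :=
  ["###100～", "###50～99", "###30～49", "###20～29", "###10～19", "###5～9", "###～4"]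

def pvBucketIdx (votes : Int) : Nat :=
  if votes ≥ 100 then 0 else if votes ≥ 50 then 1 else if votes ≥ 30 then 2
  else if votes ≥ 20 then 3 else if votes ≥ 10 then 4 else if votes ≥ 5 then 5 else 6

-- the Python list-of-seven-lists 'buckets' modelled as an index → list map, appended in place
def pvAddBucket (b : Nat → List String) (i : Nat) (code : String) : Nat → List String :=
  fun j => if j = i then b j ++ [code] else b j

def format_vote_data_with_thresh_alt (vote_data : List (String × Int)) : String :=
  let sorted_data := PySem.List.sorted vote_data (fun row => row.2) true
  let buckets := sorted_data.foldl
    (fun b row => pvAddBucket b (pvBucketIdx row.2) row.1) (fun _ => [])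
  let lines := (PySem.List.enumerate pvLabels).foldl
    (fun acc it => (acc ++ [it.2]) ++ buckets it.1.toNat) []
  PySem.Str.join "\n" lines

-- ===== PRECONDITION & SPEC =====
def Spec_format_vote_data_with_thresh (vote_data : List (String × Int)) (out : String) : Prop := out = format_vote_data_with_thresh_alt vote_data
instance (vote_data : List (String × Int)) (out : String) : Decidable (Spec_format_vote_data_with_thresh vote_data out) := by unfold Spec_format_vote_data_with_thresh; infer_instance

-- ===== CLAIM (what is proved, stated in full; the proofs are below) =====
def Claim_equal_format_vote_data_with_thresh : Prop := ∀ (vote_data : List (String × Int)), Dom_format_vote_data_with_thresh vote_data → Spec_format_vote_data_with_thresh vote_data (format_vote_data_with_thresh vote_data)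

-- ===== LEMMAS AND PROOFS =====

-- the bucketing fold computes, at each index j, the stable filter of the traversed list
theorem pvBucketFold (s : List (String × Int)) (b : Nat → List String) (j : Nat) :
    (s.foldl (fun b row => pvAddBucket b (pvBucketIdx row.2) row.1) b) j
      = b j ++ (s.filter (fun r => pvBucketIdx r.2 == j)).map (·.1) := by
  induction s generalizing b with
  | nil => simp
  | cons r t ih =>
      simp only [List.foldl_cons, ih, List.filter_cons]
      by_cases h : pvBucketIdx r.2 = j
      · simp [pvAddBucket, h]
      · simp [pvAddBucket, h, Ne.symm h]

theorem pvIdx0 (v : Int) : (pvBucketIdx v == 0) = (decide (100 ≤ v)) := by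
  simp only [pvBucketIdx]; split_ifs <;> simp <;> omega
theorem pvIdx1 (v : Int) : (pvBucketIdx v == 1) = (decide (50 ≤ v) && decide (v < 100)) := by
  simp only [pvBucketIdx]; split_ifs <;> simp <;> omega
theorem pvIdx2 (v : Int) : (pvBucketIdx v == 2) = (decide (30 ≤ v) && decide (v < 50)) := by
  simp only [pvBucketIdx]; split_ifs <;> simp <;> omega
theorem pvIdx3 (v : Int) : (pvBucketIdx v == 3) = (decide (20 ≤ v) && decide (v < 30)) := by
  simp only [pvBucketIdx]; split_ifs <;> simp <;> omega
theorem pvIdx4 (v : Int) : (pvBucketIdx v == 4) = (decide (10 ≤ v) && decide (v < 20)) := by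
  simp only [pvBucketIdx]; split_ifs <;> simp <;> omega
theorem pvIdx5 (v : Int) : (pvBucketIdx v == 5) = (decide (5 ≤ v) && decide (v < 10)) := by
  simp only [pvBucketIdx]; split_ifs <;> simp <;> omega
theorem pvIdx6 (v : Int) : (pvBucketIdx v == 6) = (decide (v < 5)) := by
  simp only [pvBucketIdx]; split_ifs <;> simp <;> omega

-- ===== VERDICT (by name: the statement is the Claim_ definition above) =====
theorem format_vote_data_with_thresh_spec : Claim_equal_format_vote_data_with_thresh := by
  intro vote_data _
  unfold Spec_format_vote_data_with_thresh format_vote_data_with_thresh format_vote_data_with_thresh_alt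
  have ht : PySem.List.sorted THRESHOLDS (fun x => x) true = ([100,50,30,20,10,5] : List Int) := by decide
  simp only [ht, PySem.List.enumerate_cons, PySem.List.enumerate_nil, List.foldl_cons, List.foldl_nil, pvBucketFold, pvLabels]
  norm_num
  simp only [
    show PySem.List.pyGetD ([100,50,30,20,10,5] : List Int) 1 0 = 50 from by decide,
    show PySem.List.pyGetD ([100,50,30,20,10,5] : List Int) 2 0 = 30 from by decide,
    show PySem.List.pyGetD ([100,50,30,20,10,5] : List Int) 3 0 = 20 from by decide,
    show PySem.List.pyGetD ([100,50,30,20,10,5] : List Int) 4 0 = 10 from by decide,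
    show PySem.List.pyGetD ([100,50,30,20,10,5] : List Int) (-1) 0 = 5 from by decide,
    show ((1:Int) == 0) = false from by decide, show ((2:Int) == 0) = false from by decide,
    show ((3:Int) == 0) = false from by decide, show ((4:Int) == 0) = false from by decide,
    show ((5:Int) == 0) = false from by decide, Bool.false_or,
    show Int.toNat 2 = 2 from by decide, show Int.toNat 3 = 3 from by decide,
    show Int.toNat 4 = 4 from by decide, show Int.toNat 5 = 5 from by decide,
    show Int.toNat 6 = 6 from by decide,
    pvIdx0, pvIdx1, pvIdx2, pvIdx3, pvIdx4, pvIdx5, pvIdx6,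
    show "###" ++ PySem.Int.toStr 100 ++ "～" = "###100～" from by decide,
    show "###" ++ PySem.Int.toStr 50 ++ "～" ++ PySem.Int.toStr 99 = "###50～99" from by decide,
    show "###" ++ PySem.Int.toStr 30 ++ "～" ++ PySem.Int.toStr (50 - 1) = "###30～49" from by decide,
    show "###" ++ PySem.Int.toStr 20 ++ "～" ++ PySem.Int.toStr (30 - 1) = "###20～29" from by decide,
    show "###" ++ PySem.Int.toStr 10 ++ "～" ++ PySem.Int.toStr (20 - 1) = "###10～19" from by decide,
    show "###" ++ PySem.Int.toStr 5 ++ "～" ++ PySem.Int.toStr (10 - 1) = "###5～9" from by decide,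
    show "###～" ++ PySem.Int.toStr (5 - 1) = "###～4" from by decide]
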